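-- pv_equiv track=rewrite | github.com/Haotian9850/astr-senior-thesis | workspace/latexgen/MoleculePrettyTexPrinter.py | pretty_print_molecule
-- ===== SOURCE A (Python) =====
-- def pretty_print_molecule(compound):
--     if compound[0] == 'U':
--         return
--     compoundList = []
--     splitIndice = []
--     result = []
--     for i in range(0, len(compound) - 1):
--         if (compound[i].isdigit() and not compound[i + 1].isdigit()):
--             splitIndice.append(i + 1)
--         elif (not compound[i].isdigit() and compound[i + 1].isdigit()):
--             splitIndice.append(i + 1)
--     splitIndice.insert(0, 0)
--     splitIndice.insert(len(splitIndice), len(compound))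
--     for i in range(0, len(splitIndice) - 1):
--         compoundList.append(compound[splitIndice[i] : splitIndice[i + 1]])
--     for element in compoundList:
--         newElement = element
--         if element.isdigit():
--             newElement = "_{" + element + "}"
--         result.append(newElement)
--     return "".join(result)
-- ===== SOURCE B (Python) =====
-- def pretty_print_molecule(compound):
--     if compound[0] == 'U':
--         return
--     out = []
--     prev_digit = False
--     for ch in compound:
--         d = ch.isdigit()
--         if d and not prev_digit:
--             out.append('_{')
--         elif prev_digit and not d:
--             out.append('}')
--         out.append(ch)
--         prev_digit = d
--     if prev_digit:
--         out.append('}')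
--     return ''.join(out)
-- ===== Notes on version B (the rewrite author's own statement) =====
-- stated objective: simpler
-- what changed: Replaces A's three staged passes (collect split indices, slice the string between them, wrap digit slices) by a single streaming state machine over the characters that emits the opening subscript marker on entering a digit run, the closing brace on leaving one, and closes a trailing digit run at the end; no run segmentation or slicing at all.
import Mathlib
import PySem

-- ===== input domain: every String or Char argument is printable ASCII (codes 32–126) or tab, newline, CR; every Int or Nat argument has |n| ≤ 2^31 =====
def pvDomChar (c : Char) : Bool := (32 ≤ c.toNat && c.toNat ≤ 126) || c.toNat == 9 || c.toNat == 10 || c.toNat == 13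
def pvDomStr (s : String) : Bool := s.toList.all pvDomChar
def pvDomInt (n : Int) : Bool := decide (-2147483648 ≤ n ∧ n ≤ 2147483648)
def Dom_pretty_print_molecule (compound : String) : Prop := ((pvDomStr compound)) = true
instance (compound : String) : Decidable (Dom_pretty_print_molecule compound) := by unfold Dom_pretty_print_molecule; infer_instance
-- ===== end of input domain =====

-- B replaces A's three staged passes (split indices, slicing, wrapping digit slices) by one
-- streaming state machine emitting the subscript delimiters at digit-class transitions: simpler, same values.

-- ===== PORT A =====
def pretty_print_molecule (compound : String) : Option String :=
  let cs := compound.toList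
  match PySem.List.pyGet? cs 0 with          -- compound[0]: IndexError on "" (excluded by Pre_)
  | none => none
  | some c0 =>
    if c0 = 'U' then none
    else
      let splitIndice : List Int :=
        (PySem.List.pyRange 0 ((cs.length : Int) - 1) 1).foldl (fun acc i =>
          if PySem.Chars.isdigit (PySem.List.pyGetD cs i ' ') &&
             !PySem.Chars.isdigit (PySem.List.pyGetD cs (i + 1) ' ') then acc ++ [i + 1]
          else if !PySem.Chars.isdigit (PySem.List.pyGetD cs i ' ') &&
             PySem.Chars.isdigit (PySem.List.pyGetD cs (i + 1) ' ') then acc ++ [i + 1]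
          else acc) []
      let splitIndice2 : List Int := 0 :: splitIndice
      let splitIndice3 : List Int := splitIndice2 ++ [(cs.length : Int)]
      let compoundList : List (List Char) :=
        (PySem.List.pyRange 0 ((splitIndice3.length : Int) - 1) 1).foldl (fun acc i =>
          acc ++ [PySem.List.slice cs (some (PySem.List.pyGetD splitIndice3 i 0))
                    (some (PySem.List.pyGetD splitIndice3 (i + 1) 0))]) []
      let result : List (List Char) :=
        compoundList.foldl (fun acc el =>
          if PySem.Chars.strIsdigit el then acc ++ ['_' :: '{' :: (el ++ ['}'])]
          else acc ++ [el]) []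
      some (String.ofList (PySem.Chars.join [] result))

-- ===== PORT B =====
-- loop body of B's single pass: emit the opening marker on entering a digit run, the closing
-- brace on leaving one, then the char itself
def pvStep (acc : List Char × Bool) (ch : Char) : List Char × Bool :=
  let d := PySem.Chars.isdigit ch
  let acc1 := if d && !acc.2 then acc.1 ++ ['_', '{']
              else if acc.2 && !d then acc.1 ++ ['}']
              else acc.1
  (acc1 ++ [ch], d)

def pretty_print_molecule_alt (compound : String) : Option String :=
  let cs := compound.toList
  match PySem.List.pyGet? cs 0 with          -- compound[0]: IndexError on "" (excluded by Pre_)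
  | none => none
  | some c0 =>
    if c0 = 'U' then none
    else
      let st := cs.foldl pvStep ([], false)
      some (String.ofList (if st.2 then st.1 ++ ['}'] else st.1))

-- ===== PRECONDITION & SPEC =====
-- Pre_ excludes only the empty string, on which A (and B) raise IndexError at compound[0].
def Pre_pretty_print_molecule (compound : String) : Prop := compound ≠ ""
instance (compound : String) : Decidable (Pre_pretty_print_molecule compound) := by
  unfold Pre_pretty_print_molecule; infer_instance
def pvWitness_pretty_print_molecule : String := "H2O"

def Spec_pretty_print_molecule (compound : String) (out : Option String) : Prop :=
  out = pretty_print_molecule_alt compound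
instance (compound : String) (out : Option String) : Decidable (Spec_pretty_print_molecule compound out) := by
  unfold Spec_pretty_print_molecule; infer_instance

-- ===== CLAIM (what is proved, stated in full; the proofs are below) =====
def Claim_equal_pretty_print_molecule : Prop := ∀ (compound : String),
  Dom_pretty_print_molecule compound → Pre_pretty_print_molecule compound →
  Spec_pretty_print_molecule compound (pretty_print_molecule compound)

-- ===== LEMMAS AND PROOFS =====

-- maximal runs of equal isdigit class, with their class (proof-only device relating A and B)
def pvRuns : List Char → List (Bool × List Char)
  | [] => []
  | c :: rest =>
    (PySem.Chars.isdigit c,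
      c :: rest.takeWhile (fun d => PySem.Chars.isdigit d == PySem.Chars.isdigit c)) ::
    pvRuns (rest.dropWhile (fun d => PySem.Chars.isdigit d == PySem.Chars.isdigit c))
termination_by l => l.length
decreasing_by
  exact Nat.lt_succ_of_le (List.length_dropWhile_le _ _)

def pvWrap (kr : Bool × List Char) : List Char :=
  if kr.1 then '_' :: '{' :: (kr.2 ++ ['}']) else kr.2

lemma pvRuns_cons (c : Char) (rest : List Char) :
    pvRuns (c :: rest) =
      (PySem.Chars.isdigit c,
        c :: rest.takeWhile (fun d => PySem.Chars.isdigit d == PySem.Chars.isdigit c)) ::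
      pvRuns (rest.dropWhile (fun d => PySem.Chars.isdigit d == PySem.Chars.isdigit c)) := by
  rw [pvRuns]

lemma pvRuns_nil : pvRuns [] = [] := by
  rw [pvRuns]

-- A's split indices, in Nat form: positions i+1 where the isdigit class changes
def pvBndsF (cs : List Char) : List Nat :=
  ((List.range (cs.length - 1)).filter
     (fun i => PySem.Chars.isdigit (cs.getD i ' ') != PySem.Chars.isdigit (cs.getD (i+1) ' '))).map (· + 1)

lemma pvBndsF_cons_cons (a b : Char) (u : List Char) :
    pvBndsF (a :: b :: u) =
      (if PySem.Chars.isdigit a == PySem.Chars.isdigit b then [] else [1]) ++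
        (pvBndsF (b :: u)).map (· + 1) := by
  by_cases h : PySem.Chars.isdigit a == PySem.Chars.isdigit b <;>
    simp [pvBndsF, List.range_succ_eq_map, List.filter_map,
      Function.comp_def, h, List.map_map, bne]

lemma pv_getD_cast (l : List Nat) (k : Nat) :
    (l.map (fun (n : Nat) => (n : Int))).getD k 0 = ((l.getD k 0 : Nat) : Int) := by
  induction l generalizing k with
  | nil => simp
  | cons a l ih =>
    cases k with
    | zero => simp
    | succ k => simpa using ih k

-- index-pair map over consecutive getD's = map over zip with tail
lemma pv_map_range_pair {α β : Type} (d : α) (g : α → α → β) :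
    ∀ (l : List α), (List.range (l.length - 1)).map (fun i => g (l.getD i d) (l.getD (i+1) d))
      = (l.zip l.tail).map (fun p => g p.1 p.2) := by
  intro l
  induction l with
  | nil => simp
  | cons a l ih =>
    cases l with
    | nil => simp
    | cons b u =>
      rw [show (a :: b :: u).length - 1 = ((b :: u).length - 1) + 1 by simp]
      rw [List.range_succ_eq_map]
      simp only [List.map_cons, List.map_map, List.zip_cons_cons, List.tail_cons,
        Function.comp_def, List.getD_cons_succ, List.getD_cons_zero]
      simp only [List.getD_cons_succ, List.tail_cons] at ih
      rw [ih]

-- shifting every boundary by one shifts the slice window into the tail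
lemma pv_zip_shift {γ : Type} (g gs : Nat × Nat → γ)
    (hg : ∀ p : Nat × Nat, g (p.1 + 1, p.2 + 1) = gs p) :
    ∀ (X Y : List Nat), ((X.map (· + 1)).zip (Y.map (· + 1))).map g = (X.zip Y).map gs := by
  intro X Y
  rw [List.zip_map, List.map_map]
  apply List.map_congr_left
  intro p _
  simpa [Function.comp_def, Prod.map] using hg p

-- the chunks A slices out are exactly the maximal runs
lemma pv_chunks_eq_runs : ∀ (cs : List Char), cs ≠ [] →
    ((0 :: (pvBndsF cs ++ [cs.length])).zip (pvBndsF cs ++ [cs.length])).map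
       (fun p => (cs.drop p.1).take (p.2 - p.1))
      = (pvRuns cs).map Prod.snd := by
  intro cs
  induction cs with
  | nil => intro h; exact absurd rfl h
  | cons a l ih =>
    intro _
    cases l with
    | nil =>
      simp [pvRuns_cons, pvRuns_nil, pvBndsF]
    | cons b u =>
      have IH := ih (by simp)
      rw [pvBndsF_cons_cons]
      rcases hX : pvBndsF (b :: u) ++ [(b :: u).length] with _ | ⟨t0, T'⟩
      · exact absurd hX (by simp)
      · simp only [hX] at IH
        have hfull : (pvBndsF (b :: u)).map (· + 1) ++ [(a :: b :: u).length]
            = (t0 + 1) :: T'.map (· + 1) := by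
          have h' : ((pvBndsF (b :: u) ++ [(b :: u).length]).map (· + 1))
              = (t0 :: T').map (· + 1) := by rw [hX]
          simpa [List.map_append] using h'
        simp only [pvRuns_cons, List.zip_cons_cons, List.map_cons, Nat.sub_zero,
          List.drop_zero] at IH
        obtain ⟨h1, h2⟩ := List.cons_eq_cons.mp IH
        by_cases h : PySem.Chars.isdigit a == PySem.Chars.isdigit b
        · -- same isdigit class: a joins the first run of (b :: u)
          have hba : PySem.Chars.isdigit b = PySem.Chars.isdigit a := (beq_iff_eq.mp h).symm
          have hpab : (fun d => PySem.Chars.isdigit d == PySem.Chars.isdigit a)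
              = (fun d => PySem.Chars.isdigit d == PySem.Chars.isdigit b) := by
            funext d; rw [hba]
          rw [if_pos h, List.nil_append]
          simp only [hfull, List.zip_cons_cons, List.map_cons, Nat.sub_zero, List.drop_zero,
            List.take_succ_cons]
          rw [show ((t0 + 1) :: T'.map (· + 1) : List Nat) = (t0 :: T').map (· + 1) from rfl]
          rw [pv_zip_shift (fun p => List.take (p.2 - p.1) (List.drop p.1 (a :: b :: u)))
                (fun p => List.take (p.2 - p.1) (List.drop p.1 (b :: u)))
                (fun p => by simp [Nat.add_sub_add_right]) (t0 :: T') T']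
          rw [pvRuns_cons, hpab]
          rw [List.takeWhile_cons_of_pos (by simp),
            List.dropWhile_cons_of_pos (by simp)]
          simp only [List.map_cons]
          rw [h1, h2]
        · -- class change at a|b: [a] is its own run
          have hba : PySem.Chars.isdigit b ≠ PySem.Chars.isdigit a := fun he => h (by simp [he])
          rw [if_neg h]
          simp only [List.cons_append, List.nil_append, hfull, List.zip_cons_cons,
            List.map_cons, Nat.sub_zero, List.drop_zero, List.take_succ_cons, List.take_zero,
            Nat.add_sub_cancel, List.drop_one, List.tail_cons]
          rw [show ((t0 + 1) :: T'.map (· + 1) : List Nat) = (t0 :: T').map (· + 1) from rfl]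
          rw [pv_zip_shift (fun p => List.take (p.2 - p.1) (List.drop p.1 (a :: b :: u)))
                (fun p => List.take (p.2 - p.1) (List.drop p.1 (b :: u)))
                (fun p => by simp [Nat.add_sub_add_right]) (t0 :: T') T']
          rw [pvRuns_cons]
          rw [List.takeWhile_cons_of_neg (by simp [hba]),
            List.dropWhile_cons_of_neg (by simp [hba])]
          simp only [pvRuns_cons, List.map_cons]
          rw [h1, h2]

lemma pvRuns_key : ∀ (cs : List Char) (kr : Bool × List Char), kr ∈ pvRuns cs →
    kr.2 ≠ [] ∧ ∀ x ∈ kr.2, PySem.Chars.isdigit x = kr.1 := by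
  intro cs
  induction cs using pvRuns.induct with
  | case1 => intro kr h; simp [pvRuns] at h
  | case2 c rest ih =>
    intro kr h
    rw [pvRuns_cons] at h
    rcases List.mem_cons.mp h with rfl | h'
    · refine ⟨by simp, ?_⟩
      intro x hx
      rcases List.mem_cons.mp hx with rfl | hx'
      · rfl
      · have := List.mem_takeWhile_imp hx'
        simpa using this
    · exact ih kr h'

-- A's first loop = the Nat-level boundary list
lemma pv_split_eq (c : Char) (t : List Char) :
    (PySem.List.pyRange 0 (((c :: t).length : Int) - 1) 1).foldl (fun acc i =>
      if PySem.Chars.isdigit (PySem.List.pyGetD (c :: t) i ' ') &&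
         !PySem.Chars.isdigit (PySem.List.pyGetD (c :: t) (i + 1) ' ') then acc ++ [i + 1]
      else if !PySem.Chars.isdigit (PySem.List.pyGetD (c :: t) i ' ') &&
         PySem.Chars.isdigit (PySem.List.pyGetD (c :: t) (i + 1) ' ') then acc ++ [i + 1]
      else acc) []
    = (pvBndsF (c :: t)).map (fun (n : Nat) => (n : Int)) := by
  rw [PySem.List.foldl_congr_mem _ _ (fun acc i =>
      if (PySem.Chars.isdigit (PySem.List.pyGetD (c :: t) i ' ') !=
          PySem.Chars.isdigit (PySem.List.pyGetD (c :: t) (i + 1) ' ')) then acc ++ [i + 1]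
      else acc) _
      (by intro acc x _
          cases h1 : PySem.Chars.isdigit (PySem.List.pyGetD (c :: t) x ' ') <;>
            cases h2 : PySem.Chars.isdigit (PySem.List.pyGetD (c :: t) (x + 1) ' ') <;>
              simp [h1, h2])]
  rw [PySem.List.foldl_append_if]
  rw [show (((c :: t).length : Int) - 1) = ((t.length : Nat) : Int) by simp]
  rw [PySem.List.pyRange_zero_natCast]
  rw [List.filter_map]
  unfold pvBndsF
  simp only [List.length_cons, Nat.add_sub_cancel, List.nil_append, List.map_map]
  rw [List.filter_congr (q := fun i =>
        PySem.Chars.isdigit ((c :: t).getD i ' ') != PySem.Chars.isdigit ((c :: t).getD (i+1) ' '))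
      (fun x _ => by
        simp only [Function.comp_def]
        rw [show ((x : Int) + 1) = (((x + 1 : Nat)) : Int) by push_cast; ring]
        rw [PySem.List.pyGetD_natCast, PySem.List.pyGetD_natCast])]
  apply List.map_congr_left
  intro x _
  simp

-- A's second loop = slices between consecutive boundaries
lemma pv_chunkfold (cs : List Char) (fullN : List Nat) (h0 : fullN ≠ []) :
    (PySem.List.pyRange 0 ((((fullN.map (fun (n : Nat) => (n : Int))).length : Nat) : Int) - 1) 1).foldl
      (fun acc i =>
        acc ++ [PySem.List.slice cs (some (PySem.List.pyGetD (fullN.map (fun (n : Nat) => (n : Int))) i 0))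
                  (some (PySem.List.pyGetD (fullN.map (fun (n : Nat) => (n : Int))) (i + 1) 0))]) []
    = (fullN.zip fullN.tail).map (fun p => (cs.drop p.1).take (p.2 - p.1)) := by
  rw [PySem.List.foldl_append_singleton_eq_map]
  rw [List.length_map]
  rw [show ((fullN.length : Int) - 1) = ((fullN.length - 1 : Nat) : Int) by
      cases fullN with
      | nil => exact absurd rfl h0
      | cons x l => simp only [List.length_cons]; omega]
  rw [PySem.List.pyRange_zero_natCast, List.map_map]
  rw [← pv_map_range_pair (0 : Nat) (fun x y => (cs.drop x).take (y - x)) fullN]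
  apply List.map_congr_left
  intro k _
  have h1 : ((k : Int) + 1) = (((k + 1 : Nat)) : Int) := by push_cast; ring
  simp only [Function.comp_def, h1, PySem.List.pyGetD_natCast, pv_getD_cast]
  rw [PySem.List.slice_natCast]

-- A's third loop = map of the conditional wrapper
lemma pv_wrap_fold (L : List (List Char)) :
    L.foldl (fun acc el =>
      if PySem.Chars.strIsdigit el then acc ++ ['_' :: '{' :: (el ++ ['}'])]
      else acc ++ [el]) []
    = L.map (fun el => if PySem.Chars.strIsdigit el then '_' :: '{' :: (el ++ ['}']) else el) := by
  rw [PySem.List.foldl_congr_mem _ _ (fun acc el =>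
      acc ++ [if PySem.Chars.strIsdigit el then '_' :: '{' :: (el ++ ['}']) else el]) _
      (by intro acc x _
          by_cases h : PySem.Chars.strIsdigit x <;> simp [h])]
  rw [PySem.List.foldl_append_singleton_eq_map]
  simp

-- wrapping A's chunks by strIsdigit = wrapping the runs by their key
lemma pv_final (cs : List Char) (h : cs ≠ []) :
    (((0 :: (pvBndsF cs ++ [cs.length])).zip (pvBndsF cs ++ [cs.length])).map
        (fun p => (cs.drop p.1).take (p.2 - p.1))).map
      (fun el => if PySem.Chars.strIsdigit el then '_' :: '{' :: (el ++ ['}']) else el)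
    = (pvRuns cs).map pvWrap := by
  rw [pv_chunks_eq_runs cs h, List.map_map]
  apply List.map_congr_left
  intro kr hkr
  obtain ⟨hne, hall⟩ := pvRuns_key cs kr hkr
  rcases hkr2 : kr.2 with _ | ⟨x, xs⟩
  · exact absurd hkr2 hne
  · have hx : PySem.Chars.isdigit x = kr.1 := by
      refine hall x ?_
      rw [hkr2]; exact List.mem_cons_self ..
    cases hk : kr.1 with
    | false =>
      rw [hk] at hx
      simp [hkr2, pvWrap, hk, PySem.Chars.strIsdigit, hx]
    | true =>
      have hAll : ∀ y ∈ x :: xs, PySem.Chars.isdigit y = true := by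
        intro y hy
        rw [hall y (by rw [hkr2]; exact hy)]
        exact hk
      have hsd : PySem.Chars.strIsdigit (x :: xs) = true := by
        simp only [PySem.Chars.strIsdigit]
        simpa using hAll
      simp [hkr2, pvWrap, hk, hsd]

-- ===== B-side lemmas: the state machine produces the wrapped runs =====

-- the machine's final output from initial state prev = false
def pvMachine (cs : List Char) : List Char :=
  let st := cs.foldl pvStep ([], false)
  if st.2 then st.1 ++ ['}'] else st.1

-- the accumulator is a pure prefix
lemma pvStep_acc : ∀ (cs : List Char) (acc : List Char) (p : Bool),
    cs.foldl pvStep (acc, p) = (acc ++ (cs.foldl pvStep ([], p)).1, (cs.foldl pvStep ([], p)).2) := by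
  intro cs
  induction cs with
  | nil => intro acc p; simp
  | cons c cs ih =>
    intro acc p
    simp only [List.foldl_cons]
    rw [show pvStep (acc, p) c
        = (acc ++ (pvStep ([], p) c).1, (pvStep ([], p) c).2) by
      simp [pvStep]; split_ifs <;> simp]
    rw [ih (acc ++ (pvStep ([], p) c).1) (pvStep ([], p) c).2]
    rw [ih (pvStep ([], p) c).1 (pvStep ([], p) c).2]
    cases h : pvStep ([], p) c with
    | mk a b => simp

-- a block of characters of the current class passes through unchanged
lemma pvStep_same : ∀ (ws : List Char) (acc : List Char) (k : Bool),
    (∀ w ∈ ws, PySem.Chars.isdigit w = k) →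
    ws.foldl pvStep (acc, k) = (acc ++ ws, k) := by
  intro ws
  induction ws with
  | nil => intro acc k _; simp
  | cons w ws ih =>
    intro acc k hall
    have hw : PySem.Chars.isdigit w = k := hall w (List.mem_cons_self ..)
    simp only [List.foldl_cons]
    rw [show pvStep (acc, k) w = (acc ++ [w], k) by
      cases k <;> simp [pvStep, hw]]
    rw [ih (acc ++ [w]) k (fun x hx => hall x (List.mem_cons_of_mem _ hx))]
    simp

-- head of a dropWhile result falsifies the predicate
lemma pv_dropWhile_head {p : Char → Bool} : ∀ (l : List Char) (d : Char) (ds : List Char),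
    l.dropWhile p = d :: ds → p d = false := by
  intro l
  induction l with
  | nil => intro d ds h; simp [List.dropWhile] at h
  | cons a t ih =>
    intro d ds h
    by_cases hp : p a
    · rw [List.dropWhile_cons_of_pos hp] at h; exact ih d ds h
    · rw [List.dropWhile_cons_of_neg hp] at h
      obtain ⟨rfl, -⟩ := List.cons_eq_cons.mp h
      simpa using hp

-- join with empty separator concatenates
lemma pv_join_nil_cons (x : List Char) (xs : List (List Char)) :
    PySem.Chars.join [] (x :: xs) = x ++ PySem.Chars.join [] xs := by
  cases xs with
  | nil => simp [PySem.Chars.join_singleton, PySem.Chars.join_nil]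
  | cons y r => rw [PySem.Chars.join_cons_cons]; simp

-- the machine output is the concatenation of the wrapped runs
lemma pv_machine_eq : ∀ (cs : List Char),
    pvMachine cs = PySem.Chars.join [] ((pvRuns cs).map pvWrap) := by
  intro cs
  induction cs using pvRuns.induct with
  | case1 => simp [pvMachine, pvRuns_nil, PySem.Chars.join_nil]
  | case2 c rest ih =>
    rw [pvRuns_cons, List.map_cons, pv_join_nil_cons, ← ih]
    set k := PySem.Chars.isdigit c with hk
    set take := rest.takeWhile (fun d => PySem.Chars.isdigit d == k) with htake
    set drop := rest.dropWhile (fun d => PySem.Chars.isdigit d == k) with hdrop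
    have hrest : rest = take ++ drop := (List.takeWhile_append_dropWhile).symm
    have hp0 : pvStep ([], false) c = ((if k then ['_', '{', c] else [c]), k) := by
      simp [pvStep, ← hk]; cases k <;> simp
    have htk : ∀ w ∈ take, PySem.Chars.isdigit w = k := by
      intro w hw
      have := List.mem_takeWhile_imp hw
      simpa using this
    unfold pvMachine
    rw [show (c :: rest) = c :: (take ++ drop) by rw [← hrest]]
    simp only [List.foldl_cons, List.foldl_append]
    rw [hp0, pvStep_same take _ k htk]
    cases hd : drop with
    | nil =>
      simp only [List.foldl_nil]
      cases hkv : k <;> simp [pvWrap, pvRuns_nil]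
    | cons d ds =>
      have hdd : PySem.Chars.isdigit d = !k := by
        have h0 := pv_dropWhile_head rest d ds (hdrop.symm.trans hd)
        have h1 : PySem.Chars.isdigit d ≠ k := by simpa using h0
        cases hkk : PySem.Chars.isdigit d <;> cases hkv : k <;>
          first
            | decide
            | exact absurd (hkk.trans hkv.symm) h1
      simp only [List.foldl_cons]
      rw [show pvStep (((if k then ['_', '{', c] else [c]) ++ take), k) d
          = (((if k then ['_', '{', c] else [c]) ++ take) ++ ((if k then ['}'] else ['_', '{']) ++ [d]), !k) by
        cases hkk : k <;> simp [pvStep, hdd, hkk]]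
      have hfresh : pvStep (([] : List Char), false) d
          = ((if k then [] else ['_', '{']) ++ [d], !k) := by
        cases hkk : k <;> simp [pvStep, hdd, hkk]
      simp only [hfresh]
      rw [pvStep_acc ds _ (!k), pvStep_acc ds ((if k then [] else ['_', '{']) ++ [d]) (!k)]
      cases hq : (ds.foldl pvStep ([], !k)).2 <;>
        cases hkv : k <;> simp [pvWrap]
theorem pretty_print_molecule_spec : Claim_equal_pretty_print_molecule := by
  intro compound _ _
  unfold Spec_pretty_print_molecule
  unfold pretty_print_molecule pretty_print_molecule_alt
  cases hcs : compound.toList with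
  | nil => rfl
  | cons c t =>
    have hget : PySem.List.pyGet? (c :: t) (0 : Int) = some c := by
      simp [PySem.List.pyGet?, PySem.List.pyIdx?]
    simp only [hget]
    by_cases hU : c = 'U'
    · simp [hU]
    · simp only [if_neg hU]
      rw [pv_split_eq]
      rw [show (((0 : Int) :: (pvBndsF (c :: t)).map (fun (n : Nat) => (n : Int))) ++ [(((c :: t).length : Nat) : Int)])
          = ((0 :: (pvBndsF (c :: t) ++ [(c :: t).length])).map (fun (n : Nat) => (n : Int))) by simp]
      rw [pv_chunkfold (c :: t) (0 :: (pvBndsF (c :: t) ++ [(c :: t).length])) (by simp)]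
      simp only [List.tail_cons]
      rw [pv_wrap_fold]
      rw [pv_final (c :: t) (by simp)]
      rw [← pv_machine_eq]
      rfl
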